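-- pv_equiv track=rewrite | github.com/michalaarne-create/popelina | scripts/runtime_security/allowed_action_policy.py | _max_risk_tier
-- ===== SOURCE A (Python) =====
-- from typing import Any, Dict, Iterable, List, Optional
--
-- def _max_risk_tier(items: Iterable[str]) -> str:
--     order = {"low": 0, "medium": 1, "high": 2, "critical": 3}
--     best = "low"
--     best_rank = -1
--     for item in items:
--         rank = order.get(str(item or "").strip().lower(), -1)
--         if rank > best_rank:
--             best = str(item or "low")
--             best_rank = rank
--     return best
-- ===== SOURCE B (Python) =====
-- def _max_risk_tier(items):
--     tiers = ("critical", "high", "medium", "low")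
--     first = {}
--     for item in items:
--         key = str(item or "").strip().lower()
--         if key in tiers and key not in first:
--             first[key] = str(item)
--     for tier in tiers:
--         if tier in first:
--             return first[tier]
--     return "low"
-- ===== Notes on version B (the rewrite author's own statement) =====
-- stated objective: alternative
-- what changed: Instead of tracking a running maximum rank with a comparison per item, B records in one pass the first original item seen for each recognized tier in a dict, then probes the four tiers in fixed descending priority and returns the first hit (default 'low').
import Mathlib
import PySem

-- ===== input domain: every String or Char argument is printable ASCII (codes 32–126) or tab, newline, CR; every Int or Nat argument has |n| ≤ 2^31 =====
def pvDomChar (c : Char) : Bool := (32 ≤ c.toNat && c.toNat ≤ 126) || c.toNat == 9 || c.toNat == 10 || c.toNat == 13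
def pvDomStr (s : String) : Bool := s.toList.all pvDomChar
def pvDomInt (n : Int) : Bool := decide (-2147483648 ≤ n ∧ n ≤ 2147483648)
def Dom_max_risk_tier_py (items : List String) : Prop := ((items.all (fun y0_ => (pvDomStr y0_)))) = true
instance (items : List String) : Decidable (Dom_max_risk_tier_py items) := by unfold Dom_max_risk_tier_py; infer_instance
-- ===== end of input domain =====

-- B replaces A's running-max-rank accumulator by a first-item-per-tier dict probed in fixed descending priority (alternative decomposition, same cost); both are total, return values agree everywhere.

-- ===== PORT A =====
-- order = {"low": 0, "medium": 1, "high": 2, "critical": 3}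
def pvOrderA : PySem.Dict String Int :=
  PySem.Dict.ofList [("low", 0), ("medium", 1), ("high", 2), ("critical", 3)]

-- one iteration of A's loop body over the state (best, best_rank)
def pvStepA (st : String × Int) (item : String) : String × Int :=
  let rank := pvOrderA.getD (PySem.Str.lower (PySem.Str.strip (if item == "" then "" else item))) (-1)
  if rank > st.2 then ((if item == "" then "low" else item), rank) else st

def max_risk_tier_py (items : List String) : String :=
  (items.foldl pvStepA ("low", -1)).1

-- ===== PORT B =====
def pvTiers : List String := ["critical", "high", "medium", "low"]

-- one iteration of B's first loop: record the first item seen for a recognized tier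
def pvStepB (d : PySem.Dict String String) (item : String) : PySem.Dict String String :=
  let key := PySem.Str.lower (PySem.Str.strip (if item == "" then "" else item))
  if key ∈ pvTiers ∧ d.contains key = false then d.insert key item else d

-- B's second loop: first tier (descending priority) present in the dict
def pvProbe (first : PySem.Dict String String) : List String → String
  | [] => "low"
  | t :: ts =>
    match first.get? t with
    | some v => v
    | none => pvProbe first ts

def max_risk_tier_py_alt (items : List String) : String :=
  pvProbe (items.foldl pvStepB PySem.Dict.empty) pvTiers

-- ===== PRECONDITION & SPEC =====
def Spec_max_risk_tier_py (items : List String) (out : String) : Prop := out = max_risk_tier_py_alt items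
instance (items : List String) (out : String) : Decidable (Spec_max_risk_tier_py items out) := by unfold Spec_max_risk_tier_py; infer_instance

-- ===== CLAIM (what is proved, stated in full; the proofs are below) =====
def Claim_equal_max_risk_tier_py : Prop := ∀ (items : List String), Dom_max_risk_tier_py items → Spec_max_risk_tier_py items (max_risk_tier_py items)

-- ===== LEMMAS AND PROOFS =====

-- the normalized key both loops compute from an item
def pvNorm (item : String) : String :=
  PySem.Str.lower (PySem.Str.strip (if item == "" then "" else item))

lemma pvStepA_eq (st : String × Int) (item : String) :
    pvStepA st item =
      if pvOrderA.getD (pvNorm item) (-1) > st.2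
      then ((if item == "" then "low" else item), pvOrderA.getD (pvNorm item) (-1)) else st := rfl

lemma pvStepB_eq (d : PySem.Dict String String) (item : String) :
    pvStepB d item =
      if pvNorm item ∈ pvTiers ∧ d.contains (pvNorm item) = false
      then d.insert (pvNorm item) item else d := rfl

lemma pvNorm_empty : pvNorm "" = "" := by decide

lemma pvRank_other (key : String) (h1 : key ≠ "low") (h2 : key ≠ "medium")
    (h3 : key ≠ "high") (h4 : key ≠ "critical") : pvOrderA.getD key (-1) = -1 := by
  have hmk : pvOrderA = PySem.Dict.mk [("low", 0), ("medium", 1), ("high", 2), ("critical", 3)] := by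
    decide
  rw [hmk, PySem.Dict.getD_eq_get?_getD]
  simp [PySem.Dict.get?, Ne.symm h1, Ne.symm h2, Ne.symm h3, Ne.symm h4]

lemma pvIns_ne (d : PySem.Dict String String) (k k' v : String) (h : k' ≠ k) :
    (d.insert k v).get? k' = d.get? k' := PySem.Dict.get?_insert_of_ne d v h

lemma pvIns_self (d : PySem.Dict String String) (k v : String) :
    (d.insert k v).get? k = some v := PySem.Dict.get?_insert_self d k v

lemma pvContains_false (d : PySem.Dict String String) (k : String) :
    d.contains k = false ↔ d.get? k = none := by
  rw [PySem.Dict.contains_eq_isSome_get?]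
  cases d.get? k <;> simp

-- item ≠ "" whenever its normalized key is a recognized tier
lemma pvItem_ne_empty (item t : String) (ht : t ≠ "") (h : pvNorm item = t) : item ≠ "" := by
  intro he
  rw [he, pvNorm_empty] at h
  exact ht h.symm

-- loop invariant: A's (best, best_rank) state and B's first-per-tier dict stay in sync
lemma pv_loop (items : List String) :
    ∀ (b : String) (r : Int) (d : PySem.Dict String String),
    (r < 3 → d.get? "critical" = none) →
    (r < 2 → d.get? "high" = none) →
    (r < 1 → d.get? "medium" = none) →
    (r < 0 → d.get? "low" = none) →
    ((r = -1 ∧ b = "low") ∨ (r = 0 ∧ d.get? "low" = some b) ∨ (r = 1 ∧ d.get? "medium" = some b) ∨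
     (r = 2 ∧ d.get? "high" = some b) ∨ (r = 3 ∧ d.get? "critical" = some b)) →
    (items.foldl pvStepA (b, r)).1 = pvProbe (items.foldl pvStepB d) pvTiers := by
  induction items with
  | nil =>
    intro b r d h3 h2 h1 h0 hb
    simp only [List.foldl_nil]
    rcases hb with ⟨hr, rfl⟩ | ⟨hr, hg⟩ | ⟨hr, hg⟩ | ⟨hr, hg⟩ | ⟨hr, hg⟩ <;> subst hr
    · simp [pvProbe, pvTiers, h3 (by omega), h2 (by omega), h1 (by omega), h0 (by omega)]
    · simp [pvProbe, pvTiers, h3 (by omega), h2 (by omega), h1 (by omega), hg]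
    · simp [pvProbe, pvTiers, h3 (by omega), h2 (by omega), hg]
    · simp [pvProbe, pvTiers, h3 (by omega), hg]
    · simp [pvProbe, pvTiers, hg]
  | cons item rest ih =>
    intro b r d h3 h2 h1 h0 hb
    have hrange : r = -1 ∨ r = 0 ∨ r = 1 ∨ r = 2 ∨ r = 3 := by
      rcases hb with ⟨h, _⟩ | ⟨h, _⟩ | ⟨h, _⟩ | ⟨h, _⟩ | ⟨h, _⟩ <;> omega
    rw [List.foldl_cons, List.foldl_cons]
    by_cases hc : pvNorm item = "critical"
    · have hne : item ≠ "" := pvItem_ne_empty item _ (by decide) hc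
      have hA : pvStepA (b, r) item = if (3 : Int) > r then (item, 3) else (b, r) := by
        rw [pvStepA_eq, hc, show pvOrderA.getD "critical" (-1) = 3 from by decide]; simp [hne]
      have hB : pvStepB d item =
          if d.contains "critical" = false then d.insert "critical" item else d := by
        rw [pvStepB_eq, hc]; simp [pvTiers]
      by_cases hr3 : (3 : Int) > r
      · have hcont : d.contains "critical" = false := (pvContains_false d _).mpr (h3 hr3)
        rw [hA, hB, if_pos hr3, if_pos hcont]
        exact ih item 3 _ (fun h => absurd h (by omega)) (fun h => absurd h (by omega))
          (fun h => absurd h (by omega)) (fun h => absurd h (by omega))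
          (Or.inr (Or.inr (Or.inr (Or.inr ⟨rfl, pvIns_self d _ item⟩))))
      · have hr : r = 3 := by rcases hrange with rfl | rfl | rfl | rfl | rfl <;> omega
        subst hr
        rcases hb with ⟨h, _⟩ | ⟨h, hg⟩ | ⟨h, hg⟩ | ⟨h, hg⟩ | ⟨h, hg⟩ <;> try omega
        have hcont : ¬ d.contains "critical" = false := by
          rw [pvContains_false, hg]; simp
        rw [hA, hB, if_neg hr3, if_neg hcont]
        exact ih b 3 d h3 h2 h1 h0 (Or.inr (Or.inr (Or.inr (Or.inr ⟨rfl, hg⟩))))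
    · by_cases hh : pvNorm item = "high"
      · have hne : item ≠ "" := pvItem_ne_empty item _ (by decide) hh
        have hA : pvStepA (b, r) item = if (2 : Int) > r then (item, 2) else (b, r) := by
          rw [pvStepA_eq, hh, show pvOrderA.getD "high" (-1) = 2 from by decide]; simp [hne]
        have hB : pvStepB d item =
            if d.contains "high" = false then d.insert "high" item else d := by
          rw [pvStepB_eq, hh]; simp [pvTiers]
        by_cases hr2 : (2 : Int) > r
        · have hcont : d.contains "high" = false := (pvContains_false d _).mpr (h2 hr2)
          rw [hA, hB, if_pos hr2, if_pos hcont]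
          exact ih item 2 _
            (fun h => by rw [pvIns_ne d _ _ _ (by decide)]; exact h3 (by omega))
            (fun h => absurd h (by omega)) (fun h => absurd h (by omega))
            (fun h => absurd h (by omega))
            (Or.inr (Or.inr (Or.inr (Or.inl ⟨rfl, pvIns_self d _ item⟩))))
        · rw [hA, if_neg hr2]
          by_cases hcont : d.contains "high" = false
          · rw [hB, if_pos hcont]
            refine ih b r _
              (fun h => by rw [pvIns_ne d _ _ _ (by decide)]; exact h3 h)
              (fun h => absurd h (by omega))
              (fun h => absurd h (by omega)) (fun h => absurd h (by omega)) ?_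
            rcases hb with ⟨h, _⟩ | ⟨h, hg⟩ | ⟨h, hg⟩ | ⟨h, hg⟩ | ⟨h, hg⟩
            · omega
            · omega
            · omega
            · exact absurd ((pvContains_false d _).mp hcont) (by rw [hg]; simp)
            · exact Or.inr (Or.inr (Or.inr (Or.inr
                ⟨h, by rw [pvIns_ne d _ _ _ (by decide)]; exact hg⟩)))
          · rw [hB, if_neg hcont]
            exact ih b r d h3 h2 h1 h0 hb
      · by_cases hm : pvNorm item = "medium"
        · have hne : item ≠ "" := pvItem_ne_empty item _ (by decide) hm
          have hA : pvStepA (b, r) item = if (1 : Int) > r then (item, 1) else (b, r) := by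
            rw [pvStepA_eq, hm, show pvOrderA.getD "medium" (-1) = 1 from by decide]; simp [hne]
          have hB : pvStepB d item =
              if d.contains "medium" = false then d.insert "medium" item else d := by
            rw [pvStepB_eq, hm]; simp [pvTiers]
          by_cases hr1 : (1 : Int) > r
          · have hcont : d.contains "medium" = false := (pvContains_false d _).mpr (h1 hr1)
            rw [hA, hB, if_pos hr1, if_pos hcont]
            exact ih item 1 _
              (fun h => by rw [pvIns_ne d _ _ _ (by decide)]; exact h3 (by omega))
              (fun h => by rw [pvIns_ne d _ _ _ (by decide)]; exact h2 (by omega))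
              (fun h => absurd h (by omega)) (fun h => absurd h (by omega))
              (Or.inr (Or.inr (Or.inl ⟨rfl, pvIns_self d _ item⟩)))
          · rw [hA, if_neg hr1]
            by_cases hcont : d.contains "medium" = false
            · rw [hB, if_pos hcont]
              refine ih b r _
                (fun h => by rw [pvIns_ne d _ _ _ (by decide)]; exact h3 h)
                (fun h => by rw [pvIns_ne d _ _ _ (by decide)]; exact h2 h)
                (fun h => absurd h (by omega)) (fun h => absurd h (by omega)) ?_
              rcases hb with ⟨h, _⟩ | ⟨h, hg⟩ | ⟨h, hg⟩ | ⟨h, hg⟩ | ⟨h, hg⟩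
              · omega
              · omega
              · exact absurd ((pvContains_false d _).mp hcont) (by rw [hg]; simp)
              · exact Or.inr (Or.inr (Or.inr (Or.inl
                  ⟨h, by rw [pvIns_ne d _ _ _ (by decide)]; exact hg⟩)))
              · exact Or.inr (Or.inr (Or.inr (Or.inr
                  ⟨h, by rw [pvIns_ne d _ _ _ (by decide)]; exact hg⟩)))
            · rw [hB, if_neg hcont]
              exact ih b r d h3 h2 h1 h0 hb
        · by_cases hl : pvNorm item = "low"
          · have hne : item ≠ "" := pvItem_ne_empty item _ (by decide) hl
            have hA : pvStepA (b, r) item = if (0 : Int) > r then (item, 0) else (b, r) := by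
              rw [pvStepA_eq, hl, show pvOrderA.getD "low" (-1) = 0 from by decide]; simp [hne]
            have hB : pvStepB d item =
                if d.contains "low" = false then d.insert "low" item else d := by
              rw [pvStepB_eq, hl]; simp [pvTiers]
            by_cases hr0 : (0 : Int) > r
            · have hcont : d.contains "low" = false := (pvContains_false d _).mpr (h0 hr0)
              rw [hA, hB, if_pos hr0, if_pos hcont]
              exact ih item 0 _
                (fun h => by rw [pvIns_ne d _ _ _ (by decide)]; exact h3 (by omega))
                (fun h => by rw [pvIns_ne d _ _ _ (by decide)]; exact h2 (by omega))
                (fun h => by rw [pvIns_ne d _ _ _ (by decide)]; exact h1 (by omega))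
                (fun h => absurd h (by omega))
                (Or.inr (Or.inl ⟨rfl, pvIns_self d _ item⟩))
            · rw [hA, if_neg hr0]
              by_cases hcont : d.contains "low" = false
              · rw [hB, if_pos hcont]
                refine ih b r _
                  (fun h => by rw [pvIns_ne d _ _ _ (by decide)]; exact h3 h)
                  (fun h => by rw [pvIns_ne d _ _ _ (by decide)]; exact h2 h)
                  (fun h => by rw [pvIns_ne d _ _ _ (by decide)]; exact h1 h)
                  (fun h => absurd h (by omega)) ?_
                rcases hb with ⟨h, _⟩ | ⟨h, hg⟩ | ⟨h, hg⟩ | ⟨h, hg⟩ | ⟨h, hg⟩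
                · omega
                · exact absurd ((pvContains_false d _).mp hcont) (by rw [hg]; simp)
                · exact Or.inr (Or.inr (Or.inl
                    ⟨h, by rw [pvIns_ne d _ _ _ (by decide)]; exact hg⟩))
                · exact Or.inr (Or.inr (Or.inr (Or.inl
                    ⟨h, by rw [pvIns_ne d _ _ _ (by decide)]; exact hg⟩)))
                · exact Or.inr (Or.inr (Or.inr (Or.inr
                    ⟨h, by rw [pvIns_ne d _ _ _ (by decide)]; exact hg⟩)))
              · rw [hB, if_neg hcont]
                exact ih b r d h3 h2 h1 h0 hb
          · -- unrecognized key: both loops leave their state unchanged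
            have hrank : pvOrderA.getD (pvNorm item) (-1) = -1 := pvRank_other _ hl hm hh hc
            have hA : pvStepA (b, r) item = (b, r) := by
              rw [pvStepA_eq, hrank, if_neg (by rcases hrange with rfl | rfl | rfl | rfl | rfl <;> omega)]
            have hB : pvStepB d item = d := by
              rw [pvStepB_eq, if_neg]
              simp [pvTiers, hc, hh, hm, hl]
            rw [hA, hB]
            exact ih b r d h3 h2 h1 h0 hb

-- ===== VERDICT (by name: the statement is the Claim_ definition above) =====
theorem max_risk_tier_py_spec : Claim_equal_max_risk_tier_py := by
  intro items _
  unfold Spec_max_risk_tier_py max_risk_tier_py max_risk_tier_py_alt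
  exact pv_loop items "low" (-1) PySem.Dict.empty
    (fun _ => by simp [PySem.Dict.get?_empty]) (fun _ => by simp [PySem.Dict.get?_empty])
    (fun _ => by simp [PySem.Dict.get?_empty]) (fun _ => by simp [PySem.Dict.get?_empty])
    (Or.inl ⟨rfl, rfl⟩)
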